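-- pv_equiv track=rewrite | github.com/darcyjds-trip/wordwheel | scripts/generate_word_paths.py | normalize_filter_words
-- ===== SOURCE A (Python) =====
-- from typing import Callable, DefaultDict, Iterable
--
-- MIN_WORD_LENGTH = 4
--
-- MAX_WORD_LENGTH = 9
--
-- def normalize_filter_words(words: Iterable[str]) -> list[str]:
--     normalized = {
--         raw.strip().upper()
--         for raw in words
--         if raw and raw.strip().isalpha()
--     }
--     return sorted(
--         (word for word in normalized if MIN_WORD_LENGTH <= len(word) <= MAX_WORD_LENGTH),
--         key=lambda word: (len(word), word),
--     )
-- ===== SOURCE B (Python) =====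
-- MIN_WORD_LENGTH = 4
--
-- MAX_WORD_LENGTH = 9
--
-- def normalize_filter_words(words):
--     kept = []
--     for raw in words:
--         if raw and raw.strip().isalpha():
--             word = raw.strip().upper()
--             if MIN_WORD_LENGTH <= len(word) <= MAX_WORD_LENGTH:
--                 kept.append(word)
--     kept.sort(key=lambda w: (len(w), w))
--     out = []
--     for w in kept:
--         if not out or out[-1] != w:
--             out.append(w)
--     return out
-- ===== Notes on version B (the rewrite author's own statement) =====
-- stated objective: alternative
-- what changed: Replaces hash-set deduplication before sorting with a single filtering pass, a sort by (len, word), and an adjacent-duplicate scan after the sort (sort-based uniqueness instead of hash-based).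
import Mathlib
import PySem

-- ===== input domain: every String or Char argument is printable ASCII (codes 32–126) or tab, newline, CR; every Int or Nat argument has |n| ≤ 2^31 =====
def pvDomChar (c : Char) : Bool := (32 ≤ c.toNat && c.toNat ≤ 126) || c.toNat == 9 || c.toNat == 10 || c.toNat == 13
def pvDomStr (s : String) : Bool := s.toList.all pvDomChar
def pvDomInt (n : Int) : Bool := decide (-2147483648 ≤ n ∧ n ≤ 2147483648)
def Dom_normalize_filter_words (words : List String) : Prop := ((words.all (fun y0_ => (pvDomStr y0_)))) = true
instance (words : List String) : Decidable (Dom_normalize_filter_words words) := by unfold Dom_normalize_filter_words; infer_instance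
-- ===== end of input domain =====

-- B replaces A's hash-set dedup-then-sort with filter, sort by (len, word), and an adjacent-duplicate scan (alternative decomposition, same result).

-- ===== PORT A =====
def normalize_filter_words (words : List String) : List String :=
  let normalized : PySem.Set String :=
    PySem.Set.ofList
      ((words.filter (fun raw => decide (raw ≠ "") && PySem.Str.strIsalpha (PySem.Str.strip raw))).map
        (fun raw => PySem.Str.upper (PySem.Str.strip raw)))
  PySem.List.sorted2
    (normalized.filter (fun word => decide ((4:Int) ≤ PySem.Str.len word) && decide (PySem.Str.len word ≤ (9:Int))))
    (fun word => PySem.Str.len word) (fun word => word)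

-- ===== PORT B =====
def normalize_filter_words_alt (words : List String) : List String :=
  let kept : List String := words.foldl (fun kept raw =>
      if decide (raw ≠ "") && PySem.Str.strIsalpha (PySem.Str.strip raw) then
        let word := PySem.Str.upper (PySem.Str.strip raw)
        if decide ((4:Int) ≤ PySem.Str.len word) && decide (PySem.Str.len word ≤ (9:Int)) then
          kept ++ [word]
        else kept
      else kept) []
  let sortedKept := PySem.List.sorted2 kept (fun w => PySem.Str.len w) (fun w => w)
  sortedKept.foldl (fun out w =>
      if out.isEmpty || out.getLast? != some w then out ++ [w] else out) []

-- ===== PRECONDITION & SPEC =====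
def Spec_normalize_filter_words (words : List String) (out : List String) : Prop := out = normalize_filter_words_alt words
instance (words : List String) (out : List String) : Decidable (Spec_normalize_filter_words words out) := by unfold Spec_normalize_filter_words; infer_instance

-- ===== CLAIM =====
def Claim_equal_normalize_filter_words : Prop := ∀ (words : List String), Dom_normalize_filter_words words → Spec_normalize_filter_words words (normalize_filter_words words)

-- ===== LEMMAS AND PROOFS =====

-- the sort key both programs use, as a single lexicographic key
def pvKey (w : String) : Lex (Int × String) := toLex (PySem.Str.len w, w)

lemma pvKey_inj : Function.Injective pvKey := by
  intro a b h
  have := congrArg (fun k => (ofLex k).2) h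
  simpa [pvKey] using this

-- sorted2 with keys (len, id) is sorted with the lexicographic key pvKey
lemma sorted2_eq_sorted_pvKey (xs : List String) :
    PySem.List.sorted2 xs (fun w => PySem.Str.len w) (fun w => w) false
      = PySem.List.sorted xs pvKey false := by
  rw [PySem.List.sorted_eq_foldl_insertBy]
  simp only [PySem.List.sorted2, Bool.false_eq_true, if_false]
  congr 1
  funext acc x
  congr 1
  funext a b
  simp only [pvKey]
  rw [Bool.eq_iff_iff]
  simp only [Bool.or_eq_true, Bool.and_eq_true, Bool.not_eq_true', decide_eq_true_eq,
    decide_eq_false_iff_not, Prod.Lex.toLex_lt_toLex]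
  constructor
  · rintro (h | ⟨h1, h2⟩)
    · exact Or.inl h
    · rcases lt_trichotomy (PySem.Str.len a) (PySem.Str.len b) with h' | h' | h'
      · exact Or.inl h'
      · exact Or.inr ⟨h', h2⟩
      · exact absurd h' h1
  · rintro (h | ⟨h1, h2⟩)
    · exact Or.inl h
    · exact Or.inr ⟨by omega, h2⟩

-- the adjacent-dedup fold: on a key-sorted list it yields a strictly key-increasing list with the same members
lemma dd_aux (l : List String) :
    ∀ acc : List String,
      l.Pairwise (fun a b => pvKey a ≤ pvKey b) →
      acc.Pairwise (fun a b => pvKey a < pvKey b) →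
      (∀ a ∈ acc, ∀ b ∈ l, pvKey a ≤ pvKey b) →
      ((l.foldl (fun out w => if out.isEmpty || out.getLast? != some w then out ++ [w] else out) acc).Pairwise
          (fun a b => pvKey a < pvKey b)
        ∧ ∀ x, x ∈ l.foldl (fun out w => if out.isEmpty || out.getLast? != some w then out ++ [w] else out) acc
            ↔ x ∈ acc ∨ x ∈ l) := by
  induction l with
  | nil => intro acc _ hacc _; exact ⟨hacc, fun x => by simp⟩
  | cons w rest ih =>
    intro acc hl hacc hle
    have hl' : rest.Pairwise (fun a b => pvKey a ≤ pvKey b) := hl.of_cons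
    have hwrest : ∀ b ∈ rest, pvKey w ≤ pvKey b := (List.pairwise_cons.mp hl).1
    by_cases hcond : (acc.isEmpty || acc.getLast? != some w) = true
    · -- appended
      have hstep : ∀ a ∈ acc, pvKey a < pvKey w := by
        intro a ha
        have hle' : pvKey a ≤ pvKey w := hle a ha w (by simp)
        rcases lt_or_eq_of_le hle' with h | h
        · exact h
        · exfalso
          have haw : a = w := pvKey_inj h
          have hne : acc ≠ [] := by intro h'; simp [h'] at ha
          rcases Bool.or_eq_true_iff.mp hcond with h1 | h1
          · exact hne (List.isEmpty_iff.mp h1)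
          · -- getLast? ≠ some w, but a = w ∈ acc
            have hlast : acc.getLast? = some (acc.getLast hne) := List.getLast?_eq_some_getLast hne
            have hzw : acc.getLast hne ≠ w := by
              intro h2
              rw [hlast, h2] at h1
              simp at h1
            -- a ∈ acc: either a is the last element or strictly before it
            have hsplit : acc = acc.dropLast ++ [acc.getLast hne] := (List.dropLast_append_getLast hne).symm
            rw [hsplit] at ha hacc
            rcases List.mem_append.mp ha with hmem | hmem
            · have hltlast : pvKey a < pvKey (acc.getLast hne) :=
                (List.pairwise_append.mp hacc).2.2 a hmem _ (by simp)
              have hlastw : pvKey (acc.getLast hne) ≤ pvKey w :=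
                hle _ (List.getLast_mem hne) w (by simp)
              rw [haw] at h hltlast
              exact absurd (lt_of_lt_of_le hltlast hlastw) (lt_irrefl _)
            · exact hzw ((List.mem_singleton.mp hmem) ▸ haw ▸ rfl)
      have hacc' : (acc ++ [w]).Pairwise (fun a b => pvKey a < pvKey b) := by
        rw [List.pairwise_append]
        exact ⟨hacc, by simp, by intro a ha b hb; rw [List.mem_singleton.mp hb]; exact hstep a ha⟩
      have hle' : ∀ a ∈ acc ++ [w], ∀ b ∈ rest, pvKey a ≤ pvKey b := by
        intro a ha b hb
        rcases List.mem_append.mp ha with h | h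
        · exact hle a h b (by simp; exact Or.inr hb)
        · rw [List.mem_singleton.mp h]; exact hwrest b hb
      have := ih (acc ++ [w]) hl' hacc' hle'
      simp only [List.foldl_cons, if_pos hcond]
      refine ⟨this.1, fun x => ?_⟩
      rw [this.2 x]
      simp only [List.mem_append, List.mem_cons]
      tauto
    · -- not appended: acc nonempty with last = w, so w ∈ acc
      have hcond' : acc.isEmpty = false ∧ (acc.getLast? != some w) = false := by
        rcases Bool.or_eq_false_iff.mp (Bool.eq_false_iff.mpr hcond) with ⟨h1, h2⟩
        exact ⟨h1, h2⟩
      have hne : acc ≠ [] := by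
        intro h'; subst h'; simp at hcond'
      have hlastw : acc.getLast? = some w := by
        have := hcond'.2
        simpa using this
      have hwacc : w ∈ acc := by
        have := List.getLast?_eq_some_getLast hne
        rw [this] at hlastw
        exact (Option.some_inj.mp hlastw) ▸ List.getLast_mem hne
      have hle' : ∀ a ∈ acc, ∀ b ∈ rest, pvKey a ≤ pvKey b := fun a ha b hb => hle a ha b (by simp [hb])
      have := ih acc hl' hacc hle'
      simp only [List.foldl_cons, if_neg hcond]
      refine ⟨this.1, fun x => ?_⟩
      rw [this.2 x]
      constructor
      · tauto
      · rintro (h | h)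
        · exact Or.inl h
        · rcases List.mem_cons.mp h with h | h
          · exact Or.inl (h ▸ hwacc)
          · exact Or.inr h

-- abbreviations for the shared pieces
def pvP (raw : String) : Bool := decide (raw ≠ "") && PySem.Str.strIsalpha (PySem.Str.strip raw)
def pvF (raw : String) : String := PySem.Str.upper (PySem.Str.strip raw)
def pvQ (word : String) : Bool := decide ((4:Int) ≤ PySem.Str.len word) && decide (PySem.Str.len word ≤ (9:Int))

lemma filter_map_comm (l : List String) :
    (l.filter (fun x => pvQ (pvF x))).map pvF = (l.map pvF).filter pvQ := by
  induction l with
  | nil => simp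
  | cons x t ih => by_cases h : pvQ (pvF x) <;> simp [h, ih]

lemma filter_and_split (l : List String) :
    l.filter (fun raw => pvP raw && pvQ (pvF raw))
      = (l.filter pvP).filter (fun raw => pvQ (pvF raw)) := by
  induction l with
  | nil => simp
  | cons x t ih => by_cases h : pvP x <;> by_cases h' : pvQ (pvF x) <;> simp [h, h', ih]

lemma kept_eq (words : List String) :
    words.foldl (fun kept raw =>
      if pvP raw then
        if pvQ (pvF raw) then kept ++ [pvF raw] else kept
      else kept) []
    = ((words.filter pvP).map pvF).filter pvQ := by
  have h1 : words.foldl (fun kept raw =>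
      if pvP raw then
        if pvQ (pvF raw) then kept ++ [pvF raw] else kept
      else kept) []
      = words.foldl (fun kept raw =>
        if pvP raw && pvQ (pvF raw) then kept ++ [pvF raw] else kept) [] := by
    apply PySem.List.foldl_congr_mem
    intro acc x _
    by_cases h : pvP x <;> by_cases h' : pvQ (pvF x) <;> simp [h, h']
  rw [h1, PySem.List.foldl_append_if, filter_and_split, filter_map_comm]
  simp

lemma core_eq (L : List String) :
    PySem.List.sorted ((PySem.Set.ofList L).filter pvQ) pvKey false
      = (PySem.List.sorted (L.filter pvQ) pvKey false).foldl
          (fun out w => if out.isEmpty || out.getLast? != some w then out ++ [w] else out) [] := by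
  have hA_pair := PySem.List.sorted_pairwise ((PySem.Set.ofList L).filter pvQ) pvKey
  have hA_perm := PySem.List.sorted_perm ((PySem.Set.ofList L).filter pvQ) pvKey false
  have hB_sorted_pair := PySem.List.sorted_pairwise (L.filter pvQ) pvKey
  have hB_sorted_perm := PySem.List.sorted_perm (L.filter pvQ) pvKey false
  have hB := dd_aux (PySem.List.sorted (L.filter pvQ) pvKey false) []
      hB_sorted_pair (by simp) (by simp)
  have hSnodup : ((PySem.Set.ofList L).filter pvQ).Nodup := (PySem.Set.nodup_ofList L).filter _
  have hBnodup : ((PySem.List.sorted (L.filter pvQ) pvKey false).foldl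
      (fun out w => if out.isEmpty || out.getLast? != some w then out ++ [w] else out) []).Nodup := by
    refine hB.1.imp ?_
    intro a b h hab
    rw [hab] at h
    exact absurd h (lt_irrefl _)
  have hmem : ∀ x, x ∈ (PySem.List.sorted (L.filter pvQ) pvKey false).foldl
      (fun out w => if out.isEmpty || out.getLast? != some w then out ++ [w] else out) []
      ↔ x ∈ (PySem.Set.ofList L).filter pvQ := by
    intro x
    rw [hB.2 x]
    simp only [List.not_mem_nil, false_or]
    rw [hB_sorted_perm.mem_iff]
    simp [PySem.Set.mem_ofList, List.mem_filter]
  have hPermSB : ((PySem.Set.ofList L).filter pvQ).Perm ((PySem.List.sorted (L.filter pvQ) pvKey false).foldl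
      (fun out w => if out.isEmpty || out.getLast? != some w then out ++ [w] else out) []) :=
    (List.perm_ext_iff_of_nodup hSnodup hBnodup).mpr (fun x => (hmem x).symm)
  exact PySem.List.eq_of_perm_of_pairwise_le_of_injective pvKey pvKey_inj
    (hA_perm.trans hPermSB) hA_pair (hB.1.imp le_of_lt)

-- ===== VERDICT =====
theorem normalize_filter_words_spec : Claim_equal_normalize_filter_words := by
  intro words _
  show PySem.List.sorted2 ((PySem.Set.ofList ((words.filter pvP).map pvF)).filter pvQ)
        (fun word => PySem.Str.len word) (fun word => word) false
      = (PySem.List.sorted2 (words.foldl (fun kept raw =>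
            if pvP raw then if pvQ (pvF raw) then kept ++ [pvF raw] else kept else kept) [])
          (fun w => PySem.Str.len w) (fun w => w) false).foldl
          (fun out w => if out.isEmpty || out.getLast? != some w then out ++ [w] else out) []
  rw [kept_eq, sorted2_eq_sorted_pvKey, sorted2_eq_sorted_pvKey]
  exact core_eq ((words.filter pvP).map pvF)
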